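-- pv_equiv track=rewrite | github.com/Flecart/chess-software-engineering | code/bot/bot/display_board.py | _get_not_visible_squares
-- ===== SOURCE A (Python) =====
-- def _get_not_visible_squares(fen):
--     fen = fen.split(" ")[0]
--     col = 0
--     row = 7
--     position = []
--     for i in range(len(fen)):
--         if fen[i] == "/":
--             row -= 1
--             col = 0
--         elif fen[i].isdigit():
--             col += int(fen[i])
--         else:
--             col += 1
--             if fen[i] == "?":
--                 position.append((row, col))
--
--     return position
-- ===== SOURCE B (Python) =====
-- def _get_not_visible_squares(fen):
--     position = []
--     for i, rank in enumerate(fen.split(" ")[0].split("/")):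
--         expanded = "".join("." * int(ch) if ch.isdigit() else ch for ch in rank)
--         position += [(7 - i, j + 1) for j, ch in enumerate(expanded) if ch == "?"]
--     return position
-- ===== Notes on version B (the rewrite author's own statement) =====
-- stated objective: alternative
-- what changed: B materialises each rank as an expanded one-character-per-square string (digits become that many placeholder squares) and reads off '?' positions directly by list index, replacing A's single stateful scan that threads a running column/row accumulator across the raw FEN characters.
import Mathlib
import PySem

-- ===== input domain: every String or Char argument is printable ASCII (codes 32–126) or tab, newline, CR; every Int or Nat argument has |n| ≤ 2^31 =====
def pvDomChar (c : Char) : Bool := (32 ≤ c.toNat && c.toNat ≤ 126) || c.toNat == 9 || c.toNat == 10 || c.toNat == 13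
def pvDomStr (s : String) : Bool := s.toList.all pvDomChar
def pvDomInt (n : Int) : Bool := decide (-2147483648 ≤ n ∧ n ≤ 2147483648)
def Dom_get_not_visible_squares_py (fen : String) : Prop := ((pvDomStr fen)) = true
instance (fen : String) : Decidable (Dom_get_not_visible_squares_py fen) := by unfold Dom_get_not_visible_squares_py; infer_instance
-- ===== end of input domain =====

-- B materialises each rank as an expanded square-per-character string (digits become that many
-- placeholder squares) and reads '?' positions off by list index, instead of A's stateful
-- column/row accumulator scan; alternative decomposition, same return value on every input.

-- ===== PORT A =====
-- A's flat loop over the board field: state (col, row, position); '/' resets col and decrements row.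
-- ch.isdigit() is PySem.Chars.isdigit; int(ch) for an ASCII digit ch is ch.toNat - 48 (exact on Dom's ASCII).
def goA_get_not_visible : List Char → Int → Int → List (Int × Int) → List (Int × Int)
  | [], _, _, pos => pos
  | c :: cs, col, row, pos =>
    if c = '/' then goA_get_not_visible cs 0 (row - 1) pos
    else if PySem.Chars.isdigit c then goA_get_not_visible cs (col + ((c.toNat : Int) - 48)) row pos
    else goA_get_not_visible cs (col + 1) row (if c = '?' then pos ++ [(row, col + 1)] else pos)

def get_not_visible_squares_py (fen : String) : List (Int × Int) :=
  -- fen = fen.split(" ")[0]  (split on " " is never empty, so [0] is the head)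
  goA_get_not_visible ((PySem.Chars.splitOn fen.toList [' ']).headD []) 0 7 []

-- ===== PORT B =====
-- '"".join("." * int(ch) if ch.isdigit() else ch for ch in rank)': one placeholder square per digit count
def expandRank_get_not_visible (cs : List Char) : List Char :=
  cs.flatMap (fun c => if PySem.Chars.isdigit c then List.replicate (c.toNat - 48) '.' else [c])

-- '[(7 - i, j + 1) for j, ch in enumerate(expanded) if ch == "?"]'
def rankMarks_get_not_visible (row : Int) (expanded : List Char) : List (Int × Int) :=
  (PySem.List.enumerate expanded 0).filterMap
    (fun jc => if jc.2 = '?' then some (row, jc.1 + 1) else none)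

def get_not_visible_squares_py_alt (fen : String) : List (Int × Int) :=
  let ranks := PySem.Chars.splitOn ((PySem.Chars.splitOn fen.toList [' ']).headD []) ['/']
  (PySem.List.enumerate ranks 0).foldl
    (fun pos ir => pos ++ rankMarks_get_not_visible (7 - ir.1) (expandRank_get_not_visible ir.2)) []

-- ===== PRECONDITION & SPEC =====
def Spec_get_not_visible_squares_py (fen : String) (out : List (Int × Int)) : Prop := out = get_not_visible_squares_py_alt fen
instance (fen : String) (out : List (Int × Int)) : Decidable (Spec_get_not_visible_squares_py fen out) := by unfold Spec_get_not_visible_squares_py; infer_instance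

-- ===== CLAIM (what is proved, stated in full; the proofs are below) =====
def Claim_equal_get_not_visible_squares_py : Prop := ∀ (fen : String), Dom_get_not_visible_squares_py fen → Spec_get_not_visible_squares_py fen (get_not_visible_squares_py fen)

-- ===== LEMMAS AND PROOFS =====

-- structural characterisation of splitting on the single character '/'
def mySplitSlash : List Char → List (List Char)
  | [] => [[]]
  | c :: cs => if c = '/' then [] :: mySplitSlash cs else (mySplitSlash cs).modifyHead (c :: ·)

theorem mySplitSlash_ne_nil (cs : List Char) : mySplitSlash cs ≠ [] := by
  cases cs with
  | nil => simp [mySplitSlash]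
  | cons c cs =>
    simp only [mySplitSlash]
    split
    · simp
    · cases h : mySplitSlash cs with
      | nil => exact absurd h (mySplitSlash_ne_nil cs)
      | cons r rs => simp [List.modifyHead]

theorem splitOn_go_slash (fuel : Nat) (l cur : List Char) (acc : List (List Char))
    (hf : l.length < fuel) :
    PySem.Chars.splitOn.go ['/'] fuel l cur acc
      = acc.reverse ++ (mySplitSlash l).modifyHead (cur.reverse ++ ·) := by
  induction fuel generalizing l cur acc with
  | zero => omega
  | succ fuel ih =>
    cases l with
    | nil => simp [PySem.Chars.splitOn.go, mySplitSlash]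
    | cons c rest =>
      by_cases hc : c = '/'
      · subst hc
        simp only [PySem.Chars.splitOn.go, List.isPrefixOf, beq_self_eq_true, Bool.true_and,
          if_true, List.length_singleton, List.drop_succ_cons,
          List.drop_zero]
        rw [ih rest [] (cur.reverse :: acc) (by simpa using Nat.lt_of_succ_lt_succ hf)]
        simp only [mySplitSlash, List.reverse_cons, List.reverse_nil, List.nil_append,
          List.append_assoc, List.cons_append]
        cases h : mySplitSlash rest with
        | nil => exact absurd h (mySplitSlash_ne_nil rest)
        | cons r rs => simp [List.modifyHead]
      · have hpre : (['/'].isPrefixOf (c :: rest)) = false := by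
          simp only [List.isPrefixOf, Bool.and_true]
          exact beq_eq_false_iff_ne.mpr (fun h => hc h.symm)
        simp only [PySem.Chars.splitOn.go, hpre, Bool.false_eq_true, if_false]
        rw [ih rest (c :: cur) acc (by simpa using Nat.lt_of_succ_lt_succ hf)]
        simp only [mySplitSlash, hc, if_false, List.reverse_cons]
        cases h : mySplitSlash rest with
        | nil => exact absurd h (mySplitSlash_ne_nil rest)
        | cons r rs => simp [List.modifyHead]

theorem splitOn_slash_eq (cs : List Char) :
    PySem.Chars.splitOn cs ['/'] = mySplitSlash cs := by
  unfold PySem.Chars.splitOn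
  rw [splitOn_go_slash (cs.length + 1) cs [] [] (Nat.lt_succ_self _)]
  cases h : mySplitSlash cs with
  | nil => exact absurd h (mySplitSlash_ne_nil cs)
  | cons r rs => simp [List.modifyHead]

-- A's behaviour restricted to a single rank (no '/'): used to relate the two decompositions
def scanRank_get_not_visible : Int → List Char → Int → List (Int × Int) → List (Int × Int)
  | _, [], _, pos => pos
  | row, c :: cs, col, pos =>
    if PySem.Chars.isdigit c then scanRank_get_not_visible row cs (col + ((c.toNat : Int) - 48)) pos
    else scanRank_get_not_visible row cs (col + 1) (if c = '?' then pos ++ [(row, col + 1)] else pos)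

-- rank-by-rank processing with a decrementing row
def goRanks_get_not_visible : List (List Char) → Int → List (Int × Int) → List (Int × Int)
  | [], _, pos => pos
  | r :: rs, row, pos => goRanks_get_not_visible rs (row - 1) (scanRank_get_not_visible row r 0 pos)

theorem goA_eq_goRanks (bs : List Char) (col row : Int) (pos : List (Int × Int)) :
    goA_get_not_visible bs col row pos
      = match mySplitSlash bs with
        | [] => pos
        | r :: rs => goRanks_get_not_visible rs (row - 1) (scanRank_get_not_visible row r col pos) := by
  induction bs generalizing col row pos with
  | nil => simp [goA_get_not_visible, mySplitSlash, scanRank_get_not_visible, goRanks_get_not_visible]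
  | cons c cs ih =>
    by_cases hc : c = '/'
    · subst hc
      simp only [goA_get_not_visible, if_true, mySplitSlash]
      rw [ih]
      cases h : mySplitSlash cs with
      | nil => exact absurd h (mySplitSlash_ne_nil cs)
      | cons r rs =>
        simp [scanRank_get_not_visible, goRanks_get_not_visible]
    · simp only [mySplitSlash, hc, if_false]
      cases h : mySplitSlash cs with
      | nil => exact absurd h (mySplitSlash_ne_nil cs)
      | cons r rs =>
        by_cases hd : PySem.Chars.isdigit c
        · simp only [goA_get_not_visible, hc, if_false, hd, if_true]
          rw [ih, h]
          simp [List.modifyHead, scanRank_get_not_visible, hd]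
        · simp only [goA_get_not_visible, hc, if_false, hd, Bool.false_eq_true, if_false]
          rw [ih, h]
          simp [List.modifyHead, scanRank_get_not_visible, hd]

-- positions of '?' in an expanded rank, 1-based from column col: the common spec of the two inner loops
def qmarks_get_not_visible (row : Int) : Int → List Char → List (Int × Int)
  | _, [] => []
  | col, c :: cs =>
    if c = '?' then (row, col + 1) :: qmarks_get_not_visible row (col + 1) cs
    else qmarks_get_not_visible row (col + 1) cs

theorem isdigit_ge_48 (c : Char) (h : PySem.Chars.isdigit c = true) : 48 ≤ c.toNat := by
  simp only [PySem.Chars.isdigit, Bool.and_eq_true, decide_eq_true_eq, Char.le_def,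
    UInt32.le_iff_toNat_le] at h
  exact h.1

theorem qmarks_replicate_dot (row : Int) (n : Nat) (col : Int) (l : List Char) :
    qmarks_get_not_visible row col (List.replicate n '.' ++ l)
      = qmarks_get_not_visible row (col + n) l := by
  induction n generalizing col with
  | zero => simp
  | succ n ih =>
    rw [List.replicate_succ, List.cons_append]
    simp only [qmarks_get_not_visible]
    rw [ih]
    have h : col + 1 + (n : Int) = col + ((n + 1 : Nat) : Int) := by push_cast; ring
    rw [h]
    simp

theorem scanRank_eq_qmarks (row : Int) (cs : List Char) (col : Int) (pos : List (Int × Int)) :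
    scanRank_get_not_visible row cs col pos
      = pos ++ qmarks_get_not_visible row col (expandRank_get_not_visible cs) := by
  induction cs generalizing col pos with
  | nil => simp [scanRank_get_not_visible, expandRank_get_not_visible, qmarks_get_not_visible]
  | cons c cs ih =>
    by_cases hd : PySem.Chars.isdigit c
    · simp only [scanRank_get_not_visible, hd, if_true, expandRank_get_not_visible,
        List.flatMap_cons]
      rw [ih, qmarks_replicate_dot]
      have h48 := isdigit_ge_48 c hd
      congr 2
      omega
    · simp only [scanRank_get_not_visible, hd, Bool.false_eq_true, if_false,
        expandRank_get_not_visible, List.flatMap_cons]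
      rw [ih]
      by_cases hq : c = '?'
      · subst hq
        simp [qmarks_get_not_visible, expandRank_get_not_visible]
      · simp [qmarks_get_not_visible, hq, expandRank_get_not_visible]

theorem rankMarks_eq_qmarks (row : Int) (l : List Char) (s : Int) :
    (PySem.List.enumerate l s).filterMap
        (fun jc => if jc.2 = '?' then some (row, jc.1 + 1) else none)
      = qmarks_get_not_visible row s l := by
  induction l generalizing s with
  | nil => simp [PySem.List.enumerate_nil, qmarks_get_not_visible]
  | cons c cs ih =>
    rw [PySem.List.enumerate_cons]
    by_cases hq : c = '?'
    · subst hq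
      simp only [List.filterMap_cons, if_true, qmarks_get_not_visible]
      rw [ih]
    · simp only [List.filterMap_cons, hq, if_false, qmarks_get_not_visible]
      rw [ih]

theorem foldl_eq_goRanks (rs : List (List Char)) (s : Int) (pos : List (Int × Int)) :
    (PySem.List.enumerate rs s).foldl
        (fun pos ir => pos ++ rankMarks_get_not_visible (7 - ir.1) (expandRank_get_not_visible ir.2)) pos
      = goRanks_get_not_visible rs (7 - s) pos := by
  induction rs generalizing s pos with
  | nil => simp [PySem.List.enumerate_nil, goRanks_get_not_visible]
  | cons r rest ih =>
    rw [PySem.List.enumerate_cons]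
    simp only [List.foldl_cons]
    rw [ih]
    simp only [goRanks_get_not_visible]
    rw [rankMarks_get_not_visible, rankMarks_eq_qmarks, ← scanRank_eq_qmarks]
    congr 1
    ring

-- ===== VERDICT (by name: the statement is the Claim_ definition above) =====
theorem get_not_visible_squares_py_spec : Claim_equal_get_not_visible_squares_py := by
  intro fen _
  unfold Spec_get_not_visible_squares_py get_not_visible_squares_py get_not_visible_squares_py_alt
  rw [splitOn_slash_eq, foldl_eq_goRanks, goA_eq_goRanks]
  cases h : mySplitSlash ((PySem.Chars.splitOn fen.toList [' ']).headD []) with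
  | nil => exact absurd h (mySplitSlash_ne_nil _)
  | cons r rs => simp [goRanks_get_not_visible]
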